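-- pv_equiv track=rewrite | github.com/RUTuna/coding_test | programmers/lv3/디스크_컨트롤러.py | solution
-- ===== SOURCE A (Python) =====
-- from collections import deque
-- import heapq
--
-- def solution(jobs):
--     jobs = [(time, req, i) for i, (req, time) in enumerate(jobs)] # O(n)
--     request = deque(sorted(jobs, key=lambda x: x[1])) # O(nlogn)
--     wait = []
--     now = 0
--     total = 0
--
--     while request or wait: # O(n)
--         while request and request[0][1] <= now:
--             heapq.heappush(wait, request.popleft()) # O(logn)
--
--         if wait:
--             run = heapq.heappop(wait) # O(logn)
--             now = now + run[0]
--             total += now-run[1]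
--         else:
--             now = request[0][1]
--
--     return total//len(jobs)
-- ===== SOURCE B (Python) =====
-- def solution(jobs):
--     # One fixed-size pass per job: linear scans instead of sort + deque + heap.
--     pending = [(dur, req, i) for i, (req, dur) in enumerate(jobs)]
--     now = 0
--     total = 0
--     horizon = 0  # furthest point in time reached so far; a job with req <= horizon has arrived
--     for _ in range(len(jobs)):
--         avail = [t for t in pending if t[1] <= horizon]
--         if not avail:
--             now = min(t[1] for t in pending)
--             horizon = now
--             avail = [t for t in pending if t[1] <= horizon]
--         run = min(avail)
--         pending.remove(run)
--         now += run[0]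
--         total += now - run[1]
--         if now > horizon:
--             horizon = now
--     return total // len(jobs)
-- ===== Notes on version B (the rewrite author's own statement) =====
-- stated objective: alternative
-- what changed: The sorted deque of future jobs plus a binary heap of available jobs is replaced by one unordered pending list and a fixed n-iteration loop that finishes one job per round by a linear min-scan (jumping to the earliest remaining arrival when nothing has arrived), trading the O(n log n) ordered structures for O(n^2) scans with no sort, deque or heap.
import Mathlib
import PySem

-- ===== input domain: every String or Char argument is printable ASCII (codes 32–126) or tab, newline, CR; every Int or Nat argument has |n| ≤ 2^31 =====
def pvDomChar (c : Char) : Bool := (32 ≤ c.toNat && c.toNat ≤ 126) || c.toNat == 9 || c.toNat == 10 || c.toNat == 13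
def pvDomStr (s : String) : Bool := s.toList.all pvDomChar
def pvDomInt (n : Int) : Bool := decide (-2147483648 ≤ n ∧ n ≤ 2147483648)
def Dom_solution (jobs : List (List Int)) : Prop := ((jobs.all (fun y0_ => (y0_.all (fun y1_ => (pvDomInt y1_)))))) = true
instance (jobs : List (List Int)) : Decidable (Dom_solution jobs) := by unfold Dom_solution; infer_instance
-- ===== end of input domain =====

-- B replaces A's sort + deque + binary heap by one fixed-count loop with linear scans over an
-- unordered pending list; same return value on every input Pre_ admits, neither mutates the argument.

-- ===== PORT A =====
-- A's first comprehension: jobs become triples (time, req, i).  An inner list that is not a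
-- pair makes Python's unpacking raise ValueError (excluded by Pre_); the port returns a junk
-- triple there.
def enumJ (jobs : List (List Int)) : List (Int × Int × Int) :=
  (PySem.List.enumerate jobs).map (fun p =>
    match p.2 with
    | [req, time] => (time, req, p.1)
    | _ => (0, 0, p.1))

-- Python's tuple '<' on the triples (lexicographic); exact: all components are ints.
def pvLtB (a b : Int × Int × Int) : Bool :=
  decide (a.1 < b.1 ∨ (a.1 = b.1 ∧ (a.2.1 < b.2.1 ∨ (a.2.1 = b.2.1 ∧ a.2.2 < b.2.2))))

-- First minimal element of a nonempty list under pvLtB (junk on []).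
-- For A this models heapq: heappush inserts, heappop removes and returns the least element —
-- exact here because only the popped value and the heap's emptiness are ever observed.
-- For B it is Python's builtin min on a list of tuples.
def lexMin (l : List (Int × Int × Int)) : Int × Int × Int :=
  match l with
  | [] => (0, 0, 0)
  | x :: xs => xs.foldl (fun m y => if pvLtB y m then y else m) x

-- the inner 'while request and request[0][1] <= now: heappush(wait, request.popleft())'
def drainA : List (Int × Int × Int) → List (Int × Int × Int) → Int →
    List (Int × Int × Int) × List (Int × Int × Int)
  | [], wait, _ => ([], wait)
  | r :: rs, wait, now =>
    if r.2.1 ≤ now then drainA rs (wait ++ [r]) now else (r :: rs, wait)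

-- the outer 'while request or wait' loop, fuel-bounded; 2·n+2 always suffices: every
-- iteration pops a job, or is the last one, or is immediately followed by one that pops
def loopA : Nat → List (Int × Int × Int) → List (Int × Int × Int) → Int → Int → Int
  | 0, _, _, _, total => total
  | fuel + 1, request, wait, now, total =>
    if request.isEmpty && wait.isEmpty then total
    else
      let p := drainA request wait now
      if p.2.isEmpty then
        match p.1 with
        | [] => total  -- unreachable: draining a nonempty state cannot empty both lists
        | r :: _ => loopA fuel p.1 p.2 r.2.1 total
      else
        let run := lexMin p.2
        loopA fuel p.1 (p.2.erase run) (now + run.1) (total + (now + run.1 - run.2.1))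

def solution (jobs : List (List Int)) : Int :=
  let js := enumJ jobs
  let request := PySem.List.sorted js (fun x => x.2.1) false
  PySem.Int.floordiv (loopA (2 * jobs.length + 2) request [] 0 0) (jobs.length : Int)

-- ===== PORT B =====
-- Python's 'min(t[1] for t in pending)' (junk on []; pending is never empty inside B's loop)
def minReq (l : List (Int × Int × Int)) : Int :=
  match l with
  | [] => 0
  | x :: xs => xs.foldl (fun m y => if y.2.1 < m then y.2.1 else m) x.2.1

-- B's 'for _ in range(len(jobs))' loop: one job finished per round
def loopB : Nat → List (Int × Int × Int) → Int → Int → Int → Int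
  | 0, _, _, _, total => total
  | k + 1, pending, now, horizon, total =>
    let avail := pending.filter (fun t => decide (t.2.1 ≤ horizon))
    let s :=
      if avail.isEmpty then
        let m := minReq pending
        (m, m, pending.filter (fun t => decide (t.2.1 ≤ m)))
      else (now, horizon, avail)
    let run := lexMin s.2.2
    let now2 := s.1 + run.1
    let total2 := total + (now2 - run.2.1)
    let horizon2 := if s.2.1 < now2 then now2 else s.2.1
    loopB k (pending.erase run) now2 horizon2 total2

def solution_alt (jobs : List (List Int)) : Int :=
  PySem.Int.floordiv (loopB jobs.length (enumJ jobs) 0 0 0) (jobs.length : Int)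

-- ===== PRECONDITION & SPEC =====
-- Pre_ excludes exactly the inputs on which Python A raises: the empty list
-- (ZeroDivisionError in total//len(jobs)) and any inner list that is not a pair
-- (ValueError unpacking 'req, time').  B raises on exactly the same inputs.
def Pre_solution (jobs : List (List Int)) : Prop :=
  jobs ≠ [] ∧ ∀ j ∈ jobs, j.length = 2
instance (jobs : List (List Int)) : Decidable (Pre_solution jobs) := by
  unfold Pre_solution; infer_instance

def pvWitness_solution : List (List Int) := [[0, 3], [1, 9], [2, 6]]

def Spec_solution (jobs : List (List Int)) (out : Int) : Prop := out = solution_alt jobs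
instance (jobs : List (List Int)) (out : Int) : Decidable (Spec_solution jobs out) := by
  unfold Spec_solution; infer_instance

-- ===== CLAIM (what is proved, stated in full; the proofs are below) =====
def Claim_equal_solution : Prop :=
  ∀ (jobs : List (List Int)), Dom_solution jobs → Pre_solution jobs →
    Spec_solution jobs (solution jobs)

-- ===== LEMMAS AND PROOFS =====

theorem pvLtB_antisymm {a b : Int × Int × Int}
    (h1 : pvLtB a b = false) (h2 : pvLtB b a = false) : a = b := by
  obtain ⟨a1, a2, a3⟩ := a; obtain ⟨b1, b2, b3⟩ := b
  simp [pvLtB] at h1 h2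
  have : a1 = b1 ∧ a2 = b2 ∧ a3 = b3 := by omega
  simp [this.1, this.2.1, this.2.2]

theorem pvLtB_trans_neg {a b c : Int × Int × Int}
    (h1 : pvLtB b c = false) (h2 : pvLtB a b = false) : pvLtB a c = false := by
  simp [pvLtB] at *; omega

theorem pvLtB_irrefl (a : Int × Int × Int) : pvLtB a a = false := by
  simp [pvLtB]

theorem pvLtB_asymm {a b : Int × Int × Int} (h : pvLtB a b = true) : pvLtB b a = false := by
  simp [pvLtB] at *; omega

theorem pick_mem : ∀ (xs : List (Int × Int × Int)) (a : Int × Int × Int),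
    xs.foldl (fun m y => if pvLtB y m then y else m) a ∈ a :: xs := by
  intro xs
  induction xs with
  | nil => intro a; simp
  | cons y ys ih =>
    intro a
    simp only [List.foldl_cons]
    rcases List.mem_cons.mp (ih (if pvLtB y a then y else a)) with h | h
    · rw [h]; by_cases hc : pvLtB y a = true
      · simp [hc]
      · simp [hc]
    · simp [h]

theorem pick_lb : ∀ (xs : List (Int × Int × Int)) (a : Int × Int × Int),
    ∀ x ∈ a :: xs, pvLtB x (xs.foldl (fun m y => if pvLtB y m then y else m) a) = false := by
  intro xs
  induction xs with
  | nil =>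
    intro a x hx
    simp at hx; subst hx
    exact pvLtB_irrefl _
  | cons y ys ih =>
    intro a x hx
    simp only [List.foldl_cons]
    have hacc : pvLtB a (if pvLtB y a then y else a) = false ∧
        pvLtB y (if pvLtB y a then y else a) = false := by
      by_cases h : pvLtB y a = true
      · rw [if_pos h]
        exact ⟨pvLtB_asymm h, pvLtB_irrefl y⟩
      · rw [if_neg h]
        exact ⟨pvLtB_irrefl a, by simpa using h⟩
    have hrec := ih (if pvLtB y a then y else a)
    rcases List.mem_cons.mp hx with hx | hx
    · subst hx
      exact pvLtB_trans_neg (hrec _ (by simp)) hacc.1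
    · rcases List.mem_cons.mp hx with hx | hx
      · subst hx
        exact pvLtB_trans_neg (hrec _ (by simp)) hacc.2
      · exact hrec x (by simp [hx])

theorem lexMin_mem (l : List (Int × Int × Int)) (h : l ≠ []) : lexMin l ∈ l := by
  cases l with
  | nil => exact absurd rfl h
  | cons x xs => exact pick_mem xs x

theorem lexMin_not_lt (l : List (Int × Int × Int)) :
    ∀ x ∈ l, pvLtB x (lexMin l) = false := by
  cases l with
  | nil => intro x hx; simp at hx
  | cons a xs => intro x hx; exact pick_lb xs a x hx

theorem lexMin_perm {l₁ l₂ : List (Int × Int × Int)} (h : l₁.Perm l₂) (hne : l₁ ≠ []) :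
    lexMin l₁ = lexMin l₂ := by
  have hne2 : l₂ ≠ [] := by intro h2; subst h2; exact hne h.eq_nil
  have m1 := lexMin_mem l₁ hne
  have m2 := lexMin_mem l₂ hne2
  exact pvLtB_antisymm
    (lexMin_not_lt l₂ _ (h.mem_iff.mp m1))
    (lexMin_not_lt l₁ _ (h.mem_iff.mpr m2))

theorem imin_mem : ∀ (xs : List (Int × Int × Int)) (a : Int),
    xs.foldl (fun m y => if y.2.1 < m then y.2.1 else m) a = a ∨
    ∃ x ∈ xs, xs.foldl (fun m y => if y.2.1 < m then y.2.1 else m) a = x.2.1 := by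
  intro xs
  induction xs with
  | nil => intro a; simp
  | cons y ys ih =>
    intro a
    simp only [List.foldl_cons]
    by_cases hc : y.2.1 < a
    · simp only [if_pos hc]
      rcases ih y.2.1 with h | ⟨x, hx, h⟩
      · right; exact ⟨y, List.mem_cons_self .., h⟩
      · right; exact ⟨x, List.mem_cons_of_mem _ hx, h⟩
    · simp only [if_neg hc]
      rcases ih a with h | ⟨x, hx, h⟩
      · left; exact h
      · right; exact ⟨x, List.mem_cons_of_mem _ hx, h⟩

theorem imin_lb : ∀ (xs : List (Int × Int × Int)) (a : Int),
    (xs.foldl (fun m y => if y.2.1 < m then y.2.1 else m) a ≤ a) ∧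
    ∀ x ∈ xs, xs.foldl (fun m y => if y.2.1 < m then y.2.1 else m) a ≤ x.2.1 := by
  intro xs
  induction xs with
  | nil => intro a; simp
  | cons y ys ih =>
    intro a
    simp only [List.foldl_cons]
    have h := ih (if y.2.1 < a then y.2.1 else a)
    refine ⟨le_trans h.1 (by split <;> omega), fun x hx => ?_⟩
    rcases List.mem_cons.mp hx with hx | hx
    · subst hx; exact le_trans h.1 (by split <;> omega)
    · exact h.2 x hx

theorem minReq_le (l : List (Int × Int × Int)) : ∀ x ∈ l, minReq l ≤ x.2.1 := by
  cases l with
  | nil => intro x hx; simp at hx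
  | cons a xs =>
    intro x hx
    rcases List.mem_cons.mp hx with hx | hx
    · subst hx; exact (imin_lb xs x.2.1).1
    · exact (imin_lb xs a.2.1).2 x hx

theorem minReq_mem (l : List (Int × Int × Int)) (h : l ≠ []) :
    ∃ x ∈ l, minReq l = x.2.1 := by
  cases l with
  | nil => exact absurd rfl h
  | cons a xs =>
    rcases imin_mem xs a.2.1 with h1 | ⟨x, hx, h1⟩
    · exact ⟨a, List.mem_cons_self .., h1⟩
    · exact ⟨x, List.mem_cons_of_mem _ hx, h1⟩

theorem minReq_perm {l₁ l₂ : List (Int × Int × Int)} (h : l₁.Perm l₂) (hne : l₁ ≠ []) :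
    minReq l₁ = minReq l₂ := by
  have hne2 : l₂ ≠ [] := by intro h2; subst h2; exact hne h.eq_nil
  obtain ⟨x1, hx1, e1⟩ := minReq_mem l₁ hne
  obtain ⟨x2, hx2, e2⟩ := minReq_mem l₂ hne2
  have a := minReq_le l₂ x1 (h.mem_iff.mp hx1)
  have b := minReq_le l₁ x2 (h.mem_iff.mpr hx2)
  omega

theorem drainA_spec : ∀ (request wait : List (Int × Int × Int)) (now : Int),
    ∃ d r, request = d ++ r ∧ drainA request wait now = (r, wait ++ d) ∧
      (∀ x ∈ d, x.2.1 ≤ now) ∧ (∀ h t, r = h :: t → now < h.2.1) := by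
  intro request
  induction request with
  | nil => intro wait now; exact ⟨[], [], rfl, by simp [drainA], by simp, by simp⟩
  | cons r rs ih =>
    intro wait now
    by_cases hr : r.2.1 ≤ now
    · obtain ⟨d, rr, hsplit, hdrain, hd, hhead⟩ := ih (wait ++ [r]) now
      refine ⟨r :: d, rr, by simp [hsplit], ?_, ?_, hhead⟩
      · simp [drainA, hr, hdrain]
      · intro x hx; rcases List.mem_cons.mp hx with hx | hx
        · subst hx; exact hr
        · exact hd x hx
    · refine ⟨[], r :: rs, rfl, by simp [drainA, hr], by simp, ?_⟩
      intro h t heq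
      injection heq with h1 _
      subst h1; omega

theorem tail_gt {d2 r2 : List (Int × Int × Int)} {c : Int}
    (hs : (d2 ++ r2).Pairwise (fun a b => a.2.1 ≤ b.2.1))
    (hh : ∀ h t, r2 = h :: t → c < h.2.1) : ∀ x ∈ r2, c < x.2.1 := by
  have hs2 : r2.Pairwise (fun a b => a.2.1 ≤ b.2.1) :=
    List.Pairwise.sublist (List.sublist_append_right _ _) hs
  cases r2 with
  | nil => simp
  | cons h0 t0 =>
    intro x hx
    have h1 := hh h0 t0 rfl
    rcases List.mem_cons.mp hx with hx | hx
    · subst hx; exact h1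
    · have := (List.pairwise_cons.mp hs2).1 x hx; omega

theorem loop_eq : ∀ (k fuel : Nat) (request wait pending : List (Int × Int × Int))
    (now horizon total : Int),
    2 * k + 1 ≤ fuel →
    pending.length = k →
    (request ++ wait).Perm pending →
    request.Pairwise (fun a b => a.2.1 ≤ b.2.1) →
    (∀ x ∈ wait, x.2.1 ≤ horizon) →
    now ≤ horizon →
    (∀ x ∈ request, x.2.1 ≤ horizon → x.2.1 ≤ now) →
    loopA fuel request wait now total = loopB k pending now horizon total := by
  intro k
  induction k with
  | zero =>
    intro fuel request wait pending now horizon total hfuel hlen hperm hsort hwait hnh hreq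
    have hp : pending = [] := List.length_eq_zero_iff.mp hlen
    subst hp
    have hnil : request ++ wait = [] := hperm.eq_nil
    have hr : request = [] := by
      cases request with
      | nil => rfl
      | cons a l => simp at hnil
    have hw : wait = [] := by rw [hr] at hnil; simpa using hnil
    subst hr; subst hw
    cases fuel with
    | zero => simp [loopA, loopB]
    | succ f => simp [loopA, loopB]
  | succ k ih =>
    intro fuel request wait pending now horizon total hfuel hlen hperm hsort hwait hnh hreq
    obtain ⟨f, rfl⟩ : ∃ f, fuel = f + 1 := ⟨fuel - 1, by omega⟩
    have hpne : pending ≠ [] := by intro h; subst h; simp at hlen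
    have hne : (request.isEmpty && wait.isEmpty) = false := by
      cases hreq0 : request with
      | cons a l => simp
      | nil =>
        cases hw0 : wait with
        | cons a l => simp
        | nil =>
          exfalso
          rw [hreq0, hw0] at hperm
          exact hpne hperm.symm.eq_nil
    obtain ⟨d, r, hsplit, hdrain, hd, hhead⟩ := drainA_spec request wait now
    have hsortdr : (d ++ r).Pairwise (fun a b => a.2.1 ≤ b.2.1) := hsplit ▸ hsort
    have hsortr : r.Pairwise (fun a b => a.2.1 ≤ b.2.1) :=
      List.Pairwise.sublist (List.sublist_append_right _ _) hsortdr
    have hrgt : ∀ x ∈ r, now < x.2.1 := tail_gt hsortdr hhead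
    have hrgtH : ∀ x ∈ r, horizon < x.2.1 := by
      intro x hx
      have hxreq : x ∈ request := by
        rw [hsplit]; exact List.mem_append_right d hx
      by_cases hcon : x.2.1 ≤ horizon
      · have := hreq x hxreq hcon
        have := hrgt x hx
        omega
      · omega
    have hwd : ∀ x ∈ wait ++ d, x.2.1 ≤ horizon := by
      intro x hx
      rcases List.mem_append.mp hx with hx | hx
      · exact hwait x hx
      · exact le_trans (hd x hx) hnh
    have hperm2 : (r ++ (wait ++ d)).Perm pending := by
      refine List.Perm.trans ?_ hperm
      rw [hsplit, List.perm_iff_count]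
      intro a
      simp [List.count_append]
      omega
    have hfr : r.filter (fun t => decide (t.2.1 ≤ horizon)) = [] :=
      List.filter_eq_nil_iff.mpr (fun x hx => by simpa using not_le_of_gt (hrgtH x hx))
    have hfw : (wait ++ d).filter (fun t => decide (t.2.1 ≤ horizon)) = wait ++ d :=
      List.filter_eq_self.mpr (fun x hx => by simpa using hwd x hx)
    have havail : (pending.filter (fun t => decide (t.2.1 ≤ horizon))).Perm (wait ++ d) := by
      have h1 := (hperm2.filter (fun t => decide (t.2.1 ≤ horizon))).symm
      rw [List.filter_append, hfr, hfw] at h1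
      simpa using h1
    by_cases hwd0 : wait ++ d = []
    · -- A's else branch: nothing available, jump to the next arrival, then run a job
      have havail0 : pending.filter (fun t => decide (t.2.1 ≤ horizon)) = [] := by
        rw [hwd0] at havail; exact havail.eq_nil
      have hrp : r.Perm pending := by
        have := hperm2; rw [hwd0] at this; simpa using this
      have hrne : r ≠ [] := by
        intro h; rw [h] at hrp; exact hpne hrp.symm.eq_nil
      obtain ⟨h0, t0, rfl⟩ : ∃ h0 t0, r = h0 :: t0 := by
        cases r with
        | nil => exact absurd rfl hrne
        | cons a l => exact ⟨a, l, rfl⟩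
      have hm : minReq pending = h0.2.1 := by
        rw [minReq_perm hrp.symm hpne]
        have h1 := minReq_le (h0 :: t0) h0 (List.mem_cons_self ..)
        obtain ⟨x, hx, hx2⟩ := minReq_mem (h0 :: t0) (by simp)
        have h2 : h0.2.1 ≤ x.2.1 := by
          rcases List.mem_cons.mp hx with hx | hx
          · subst hx; omega
          · exact (List.pairwise_cons.mp hsortr).1 x hx
        omega
      obtain ⟨f', rfl⟩ : ∃ f', f = f' + 1 := ⟨f - 1, by omega⟩
      -- unfold A twice
      have hA : loopA (f' + 1 + 1) request wait now total =
          loopA (f' + 1) (h0 :: t0) [] h0.2.1 total := by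
        simp only [loopA, hne, Bool.false_eq_true, if_false, hdrain]
        rw [hwd0]
        simp
      -- second A step: drain (h0::t0) [] at time h0.2.1
      obtain ⟨d2, r2, hsplit2, hdrain2, hd2, hhead2⟩ := drainA_spec (h0 :: t0) [] h0.2.1
      have hd2ne : d2 ≠ [] := by
        intro h
        rw [h] at hsplit2
        simp at hsplit2
        have := hhead2 h0 t0 hsplit2.symm
        omega
      have hr2gt : ∀ x ∈ r2, h0.2.1 < x.2.1 := tail_gt (hsplit2 ▸ hsortr) hhead2
      have hf2a : d2.filter (fun t => decide (t.2.1 ≤ h0.2.1)) = d2 :=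
        List.filter_eq_self.mpr (fun x hx => by simpa using hd2 x hx)
      have hf2b : r2.filter (fun t => decide (t.2.1 ≤ h0.2.1)) = [] :=
        List.filter_eq_nil_iff.mpr (fun x hx => by simpa using not_le_of_gt (hr2gt x hx))
      have havail2 : (pending.filter (fun t => decide (t.2.1 ≤ h0.2.1))).Perm d2 := by
        have h1 := (hrp.filter (fun t => decide (t.2.1 ≤ h0.2.1))).symm
        rw [hsplit2, List.filter_append, hf2a, hf2b] at h1
        simpa using h1
      have havail2ne : pending.filter (fun t => decide (t.2.1 ≤ h0.2.1)) ≠ [] := by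
        intro h; rw [h] at havail2; exact hd2ne havail2.symm.eq_nil
      set run := lexMin d2 with hrun
      have hrunmem : run ∈ d2 := lexMin_mem d2 hd2ne
      have hrunpend : run ∈ pending := hrp.mem_iff.mp (by rw [hsplit2]; exact List.mem_append_left _ hrunmem)
      have hA2 : loopA (f' + 1) (h0 :: t0) [] h0.2.1 total =
          loopA f' r2 (d2.erase run) (h0.2.1 + run.1) (total + (h0.2.1 + run.1 - run.2.1)) := by
        simp only [loopA, hdrain2]
        have : ((h0 :: t0).isEmpty && (List.nil (α := Int × Int × Int)).isEmpty) = false := by simp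
        rw [this]
        simp only [Bool.false_eq_true, if_false]
        have hd2e : (([] : List (Int × Int × Int)) ++ d2).isEmpty = false := by
          simp [List.isEmpty_eq_false_iff, hd2ne]
        simp only [List.nil_append] at hd2e ⊢
        rw [hd2e]
        simp
        rw [← hrun]
      -- unfold B once
      have hB : loopB (k + 1) pending now horizon total =
          loopB k (pending.erase run) (h0.2.1 + run.1)
            (if h0.2.1 < h0.2.1 + run.1 then h0.2.1 + run.1 else h0.2.1)
            (total + (h0.2.1 + run.1 - run.2.1)) := by
        simp only [loopB, havail0, List.isEmpty_nil, if_true, hm]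
        have : lexMin (pending.filter (fun t => decide (t.2.1 ≤ h0.2.1))) = run :=
          lexMin_perm havail2 havail2ne
        simp [this]
      rw [hA, hA2, hB]
      apply ih
      · omega
      · rw [List.length_erase_of_mem hrunpend]; omega
      · -- (r2 ++ d2.erase run).Perm (pending.erase run)
        have h1 : (pending.erase run).Perm ((d2 ++ r2).erase run) :=
          (hrp.symm.trans (hsplit2 ▸ List.Perm.refl _)).erase run
        rw [List.erase_append_left _ hrunmem] at h1
        exact (h1.trans List.perm_append_comm).symm
      · exact List.Pairwise.sublist (List.sublist_append_right _ _) (hsplit2 ▸ hsortr)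
      · intro x hx
        have := hd2 x (List.mem_of_mem_erase hx)
        split <;> omega
      · split <;> omega
      · intro x hx h1
        have := hr2gt x hx
        rcases (by split at h1 <;> omega :
          x.2.1 ≤ h0.2.1 + run.1 ∨ x.2.1 ≤ h0.2.1) with h2 | h2
        · exact h2
        · omega
    · -- A's pop branch: some job is available
      have havailne : pending.filter (fun t => decide (t.2.1 ≤ horizon)) ≠ [] := by
        intro h; rw [h] at havail; exact hwd0 havail.symm.eq_nil
      set run := lexMin (wait ++ d) with hrun
      have hrunmem : run ∈ wait ++ d := lexMin_mem _ hwd0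
      have hrunpend : run ∈ pending := hperm2.mem_iff.mp (List.mem_append_right r hrunmem)
      have hrunnr : run ∉ r := by
        intro h
        have := hrgtH run h
        have := hwd run hrunmem
        omega
      have hA : loopA (f + 1) request wait now total =
          loopA f r ((wait ++ d).erase run) (now + run.1) (total + (now + run.1 - run.2.1)) := by
        simp only [loopA, hne, Bool.false_eq_true, if_false, hdrain]
        have hwde : (wait ++ d).isEmpty = false := by simp [List.isEmpty_eq_false_iff, hwd0]
        rw [hwde]
        simp
        rw [← hrun]
      have hB : loopB (k + 1) pending now horizon total =
          loopB k (pending.erase run) (now + run.1)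
            (if horizon < now + run.1 then now + run.1 else horizon)
            (total + (now + run.1 - run.2.1)) := by
        have he : (pending.filter (fun t => decide (t.2.1 ≤ horizon))).isEmpty = false := by
          simp [List.isEmpty_eq_false_iff, havailne]
        simp only [loopB, he, Bool.false_eq_true, if_false]
        have : lexMin (pending.filter (fun t => decide (t.2.1 ≤ horizon))) = run :=
          lexMin_perm havail havailne
        simp [this]
      rw [hA, hB]
      apply ih
      · omega
      · rw [List.length_erase_of_mem hrunpend]; omega
      · have h1 : (pending.erase run).Perm ((r ++ (wait ++ d)).erase run) := hperm2.symm.erase run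
        rw [List.erase_append_right _ hrunnr] at h1
        exact h1.symm
      · exact hsortr
      · intro x hx
        have := hwd x (List.mem_of_mem_erase hx)
        split <;> omega
      · split <;> omega
      · intro x hx h1
        have := hrgtH x hx
        split at h1 <;> omega

-- ===== VERDICT (by name: the statement is the Claim_ definition above) =====
theorem solution_spec : Claim_equal_solution := by
  intro jobs _ _
  unfold Spec_solution solution solution_alt

  have hlen : (enumJ jobs).length = jobs.length := by
    simp [enumJ, PySem.List.length_enumerate]
  have h := loop_eq jobs.length (2 * jobs.length + 2)
      (PySem.List.sorted (enumJ jobs) (fun x => x.2.1) false) [] (enumJ jobs) 0 0 0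
      (by omega)
      hlen
      (by simpa using PySem.List.sorted_perm (xs := enumJ jobs) (key := fun x => x.2.1) (rev := false))
      (PySem.List.sorted_pairwise (xs := enumJ jobs) (key := fun x => x.2.1))
      (by simp)
      le_rfl
      (fun x _ h => h)
  show PySem.Int.floordiv
      (loopA (2 * jobs.length + 2)
        (PySem.List.sorted (enumJ jobs) (fun x => x.2.1) false) [] 0 0)
      (jobs.length : Int) = _
  rw [h]
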